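-- pv_equiv track=rewrite | github.com/Florent-Olivon/MZM2-MN | mysql_processing_MacOS.py | clean_group_mapping
-- ===== SOURCE A (Python) =====
-- def clean_group_mapping(analysis_samples, mapping_groups):
--     to_process_groups = []
--     for group in mapping_groups:
--         for sample in analysis_samples:
--                 if sample in group[1]:
--                     to_process_groups.append(group)
--
--     to_return_group_list = {}
--     for group in to_process_groups:
--         temp_list = []
--         for group_file in group[1]:
--             if group_file in analysis_samples:
--                 temp_list.append(group_file)
--             to_return_group_list[group[0]] = temp_list
--     return to_return_group_list
-- ===== SOURCE B (Python) =====
-- def clean_group_mapping(analysis_samples, mapping_groups):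
--     result = {}
--     for group in mapping_groups:
--         temp = [f for f in group[1] if f in analysis_samples]
--         if temp:
--             result[group[0]] = temp
--     return result
-- ===== Notes on version B (the rewrite author's own statement) =====
-- stated objective: faster
-- what changed: Replaces A's two-phase design (a nested per-group-per-sample scan collecting one duplicate copy of each group per matching sample, then a second pass re-filtering every collected copy with repeated dict assignments) by a single pass over mapping_groups that filters each group's files once and stores the list only when non-empty.
import Mathlib
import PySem

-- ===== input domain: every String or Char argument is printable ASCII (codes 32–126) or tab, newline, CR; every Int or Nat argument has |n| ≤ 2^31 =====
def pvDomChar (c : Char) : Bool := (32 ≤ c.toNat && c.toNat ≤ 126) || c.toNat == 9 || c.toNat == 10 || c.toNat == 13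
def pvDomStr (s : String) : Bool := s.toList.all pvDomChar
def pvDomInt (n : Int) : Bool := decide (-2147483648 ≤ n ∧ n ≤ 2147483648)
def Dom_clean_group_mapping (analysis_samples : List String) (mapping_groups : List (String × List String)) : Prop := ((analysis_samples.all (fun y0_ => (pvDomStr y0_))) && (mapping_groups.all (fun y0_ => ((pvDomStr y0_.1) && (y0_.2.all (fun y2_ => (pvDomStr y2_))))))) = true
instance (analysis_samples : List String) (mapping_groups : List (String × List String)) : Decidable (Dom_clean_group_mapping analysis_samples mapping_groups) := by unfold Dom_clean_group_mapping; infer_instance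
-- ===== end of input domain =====

-- B replaces A's two-phase design (collect qualifying groups with duplicates, then rebuild each
-- filtered list via repeated dict assignments) by a single filtering pass: simpler, same result.

-- ===== PORT A =====
-- first loop body: for sample in analysis_samples: if sample in group[1]: to_process_groups.append(group)
def pvAStep1 (analysis_samples : List String) (acc : List (String × List String)) (g : String × List String) : List (String × List String) :=
  analysis_samples.foldl (fun acc2 s => if g.2.contains s then acc2 ++ [g] else acc2) acc

-- second loop body: temp_list = []; for group_file in group[1]: if …: append; to_return_group_list[group[0]] = temp_list
def pvAStep2 (analysis_samples : List String) (d : PySem.Dict String (List String)) (g : String × List String) : PySem.Dict String (List String) :=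
  (g.2.foldl (fun (st : List String × PySem.Dict String (List String)) f =>
      let temp := if analysis_samples.contains f then st.1 ++ [f] else st.1
      (temp, st.2.insert g.1 temp)) (([] : List String), d)).2

def clean_group_mapping (analysis_samples : List String) (mapping_groups : List (String × List String)) : List (String × List String) :=
  let to_process_groups := mapping_groups.foldl (pvAStep1 analysis_samples) []
  (to_process_groups.foldl (pvAStep2 analysis_samples) PySem.Dict.empty).items

-- ===== PORT B =====
-- loop body: temp = [f for f in group[1] if f in analysis_samples]; if temp: result[group[0]] = temp
def pvBStep (analysis_samples : List String) (d : PySem.Dict String (List String)) (g : String × List String) : PySem.Dict String (List String) :=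
  let temp := g.2.filter (fun f => analysis_samples.contains f)
  if temp ≠ [] then d.insert g.1 temp else d

def clean_group_mapping_alt (analysis_samples : List String) (mapping_groups : List (String × List String)) : List (String × List String) :=
  (mapping_groups.foldl (pvBStep analysis_samples) PySem.Dict.empty).items

-- ===== PRECONDITION & SPEC =====
def Spec_clean_group_mapping (analysis_samples : List String) (mapping_groups : List (String × List String)) (out : List (String × List String)) : Prop := out = clean_group_mapping_alt analysis_samples mapping_groups
instance (analysis_samples : List String) (mapping_groups : List (String × List String)) (out : List (String × List String)) : Decidable (Spec_clean_group_mapping analysis_samples mapping_groups out) := by unfold Spec_clean_group_mapping; infer_instance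

-- ===== CLAIM (what is proved, stated in full; the proofs are below) =====
def Claim_equal_clean_group_mapping : Prop := ∀ (analysis_samples : List String) (mapping_groups : List (String × List String)), Dom_clean_group_mapping analysis_samples mapping_groups → Spec_clean_group_mapping analysis_samples mapping_groups (clean_group_mapping analysis_samples mapping_groups)

-- ===== LEMMAS AND PROOFS =====

-- A's inner first-phase loop appends one copy of g per matching sample
theorem pvStep1_eq (g : String × List String) :
    ∀ (l : List String) (acc : List (String × List String)),
      l.foldl (fun acc2 s => if g.2.contains s then acc2 ++ [g] else acc2) acc
        = acc ++ (l.filter (fun s => g.2.contains s)).map (fun _ => g) := by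
  intro l
  induction l with
  | nil => simp
  | cons s l ih =>
      intro acc
      simp only [List.foldl_cons, List.filter_cons]
      by_cases h : g.2.contains s = true
      · rw [if_pos h, if_pos h, ih, List.map_cons, List.append_assoc, List.singleton_append]
      · rw [if_neg h, if_neg h, ih]

-- A's whole first phase is a flatMap of those copies
theorem pvPhase1_eq (analysis_samples : List String) :
    ∀ (ms : List (String × List String)) (acc : List (String × List String)),
      ms.foldl (pvAStep1 analysis_samples) acc
        = acc ++ ms.flatMap (fun g => (analysis_samples.filter (fun s => g.2.contains s)).map (fun _ => g)) := by
  intro ms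
  induction ms with
  | nil => simp
  | cons g ms ih =>
      intro acc
      simp only [List.foldl_cons, List.flatMap_cons]
      rw [pvAStep1, pvStep1_eq, ih, List.append_assoc]

-- characterisation of A's per-group second-phase loop
theorem pvStep2_fold (analysis_samples : List String) (k : String) :
    ∀ (l t : List String) (d : PySem.Dict String (List String)),
      (l.foldl (fun (st : List String × PySem.Dict String (List String)) f =>
          let temp := if analysis_samples.contains f then st.1 ++ [f] else st.1
          (temp, st.2.insert k temp)) (t, d)).2
        = if l.isEmpty then d else d.insert k (t ++ l.filter (fun f => analysis_samples.contains f)) := by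
  intro l
  induction l with
  | nil => simp
  | cons f l ih =>
      intro t d
      simp only [List.foldl_cons]
      rw [ih]
      by_cases hl : l.isEmpty = true
      · have hnil : l = [] := List.isEmpty_iff.mp hl
        subst hnil
        by_cases h : f ∈ analysis_samples <;> simp [h]
      · rw [if_neg hl]
        simp only [List.isEmpty_cons, Bool.false_eq_true, if_false]
        rw [PySem.Dict.insert_insert_self, List.filter_cons]
        by_cases h : f ∈ analysis_samples <;> simp [h, List.append_assoc]

theorem pvStep2_eq (analysis_samples : List String) (d : PySem.Dict String (List String)) (g : String × List String) :
    pvAStep2 analysis_samples d g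
      = if g.2.isEmpty then d else d.insert g.1 (g.2.filter (fun f => analysis_samples.contains f)) := by
  rw [pvAStep2, pvStep2_fold]
  simp

theorem pvStep2_idem (analysis_samples : List String) (d : PySem.Dict String (List String)) (g : String × List String) :
    pvAStep2 analysis_samples (pvAStep2 analysis_samples d g) g = pvAStep2 analysis_samples d g := by
  simp only [pvStep2_eq]
  by_cases h : g.2.isEmpty = true <;> simp [h, PySem.Dict.insert_insert_self]

-- folding an idempotent step over the per-group copies equals one application (when there is at least one)
theorem pvFoldl_map_const {α β : Type} (f : β → α → β) (g : α)
    (hidem : ∀ d, f (f d g) g = f d g) :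
    ∀ (l : List String) (d : β), (l.map (fun _ => g)).foldl f d = if l.isEmpty then d else f d g := by
  intro l
  induction l with
  | nil => simp
  | cons x l ih =>
      intro d
      simp only [List.map_cons, List.foldl_cons, ih]
      by_cases hl : l.isEmpty = true <;> simp [hl, hidem]

-- a qualified group (some sample among its files) is processed by A exactly as B processes it
theorem pvStepAB (analysis_samples : List String) (d : PySem.Dict String (List String)) (g : String × List String) :
    (if (analysis_samples.filter (fun s => g.2.contains s)).isEmpty then d else pvAStep2 analysis_samples d g)
      = pvBStep analysis_samples d g := by
  by_cases hq : (analysis_samples.filter (fun s => g.2.contains s)).isEmpty = true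
  · rw [if_pos hq]
    have hnone : ∀ x ∈ analysis_samples, ¬ x ∈ g.2 := by
      intro x hx hmem
      have := List.filter_eq_nil_iff.mp (List.isEmpty_iff.mp hq) x hx
      simp [hmem] at this
    have htemp : g.2.filter (fun f => analysis_samples.contains f) = [] := by
      rw [List.filter_eq_nil_iff]
      intro f hf hcon
      exact hnone f (by simpa using hcon) hf
    simp only [pvBStep, htemp, ne_eq, not_true_eq_false, if_false]
  · rw [if_neg hq]
    have hne : (analysis_samples.filter (fun s => g.2.contains s)) ≠ [] := by
      intro hnil
      rw [hnil] at hq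
      exact hq rfl
    obtain ⟨x, hx⟩ := List.exists_mem_of_ne_nil _ hne
    have hxas : x ∈ analysis_samples := (List.mem_filter.mp hx).1
    have hxg : x ∈ g.2 := by simpa using (List.mem_filter.mp hx).2
    have hgne : ¬ g.2.isEmpty = true := by
      simp only [List.isEmpty_iff]
      exact List.ne_nil_of_mem hxg
    have htemp : g.2.filter (fun f => analysis_samples.contains f) ≠ [] := by
      intro hnil
      have := List.filter_eq_nil_iff.mp hnil x hxg
      simp [hxas] at this
    rw [pvStep2_eq, if_neg hgne]
    simp only [pvBStep, ne_eq, htemp, not_false_eq_true, if_true]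

-- A's second phase over the duplicated qualifying groups equals B's single conditional pass
theorem pvPhase2_eq (analysis_samples : List String) :
    ∀ (ms : List (String × List String)) (d : PySem.Dict String (List String)),
      (ms.flatMap (fun g => (analysis_samples.filter (fun s => g.2.contains s)).map (fun _ => g))).foldl
          (pvAStep2 analysis_samples) d
        = ms.foldl (pvBStep analysis_samples) d := by
  intro ms
  induction ms with
  | nil => intro d; rfl
  | cons g ms ih =>
      intro d
      simp only [List.flatMap_cons, List.foldl_append, List.foldl_cons]
      rw [pvFoldl_map_const (pvAStep2 analysis_samples) g (fun d => pvStep2_idem analysis_samples d g),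
          ih, pvStepAB]

-- ===== VERDICT (by name: the statement is the Claim_ definition above) =====
theorem clean_group_mapping_spec : Claim_equal_clean_group_mapping := by
  intro analysis_samples mapping_groups _
  show clean_group_mapping analysis_samples mapping_groups = clean_group_mapping_alt analysis_samples mapping_groups
  simp only [clean_group_mapping, clean_group_mapping_alt]
  rw [pvPhase1_eq, List.nil_append, pvPhase2_eq]
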